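-- pv_equiv track=rewrite | github.com/MAJWCF1234/RawIron | Tests/RawIron.EngineImport.Tests/tools/merge_test_sources.py | extract_includes_and_body
-- ===== SOURCE A (Python) =====
-- def extract_includes_and_body(text: str) -> tuple[list[str], str]:
--     lines = text.splitlines(keepends=True)
--     include_lines: list[str] = []
--     rest_start = 0
--     for i, line in enumerate(lines):
--         stripped = line.strip()
--         if stripped.startswith("#include"):
--             include_lines.append(line.rstrip("\n"))
--             rest_start = i + 1
--         elif stripped == "" or stripped.startswith("//"):
--             if not include_lines:
--                 rest_start = i + 1
--             continue
--         else:
--             break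
--     body = "".join(lines[rest_start:])
--     return include_lines, body
-- ===== SOURCE B (Python) =====
-- def extract_includes_and_body(text: str) -> tuple[list[str], str]:
--     lines = text.splitlines(keepends=True)
--
--     def kind(line: str) -> int:
--         s = line.strip()
--         if s.startswith("#include"):
--             return 2
--         if s == "" or s.startswith("//"):
--             return 1
--         return 0
--
--     kinds = [kind(line) for line in lines]
--     # The scanned preamble ends at the first "other" line (kind 0).
--     p = kinds.index(0) if 0 in kinds else len(kinds)
--     prefix = kinds[:p]
--     includes = [line.rstrip("\n") for line, k in zip(lines, prefix) if k == 2]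
--     if 2 in prefix:
--         # body starts right after the last include line of the preamble
--         body_start = p - list(reversed(prefix)).index(2)
--     else:
--         body_start = p
--     return includes, "".join(lines[body_start:])
-- ===== Notes on version B (the rewrite author's own statement) =====
-- stated objective: alternative
-- what changed: Replaces A's stateful scan (accumulator list plus a conditionally-reset rest_start flag) with a declarative pipeline: classify every line once into kind 0/1/2, cut the preamble at the first kind-0 line with list.index, collect includes by filtering the classified prefix, and find the body start by locating the last include from the reversed prefix.
import Mathlib
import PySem

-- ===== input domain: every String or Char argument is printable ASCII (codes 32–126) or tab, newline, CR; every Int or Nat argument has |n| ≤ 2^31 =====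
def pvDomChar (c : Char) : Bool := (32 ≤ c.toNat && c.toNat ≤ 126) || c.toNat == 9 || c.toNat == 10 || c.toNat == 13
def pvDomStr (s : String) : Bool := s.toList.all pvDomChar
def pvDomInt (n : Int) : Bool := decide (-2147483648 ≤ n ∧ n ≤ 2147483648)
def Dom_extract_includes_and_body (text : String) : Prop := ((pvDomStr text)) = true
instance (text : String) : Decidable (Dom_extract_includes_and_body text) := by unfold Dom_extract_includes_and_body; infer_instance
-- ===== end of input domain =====

-- B replaces A's stateful scan (accumulator + conditionally-reset rest_start) with a
-- declarative pipeline: classify every line once, cut at the first ordinary line, filter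
-- the includes, and locate the body start from the reversed prefix; same O(n) cost.

-- Shared transliterations of Python built-ins both sources call:
-- text.splitlines(keepends=True): exact on the Dom (ASCII + tab/newline/CR), where the only
-- line terminators Python recognises are '\n', '\r' and '\r\n'.
def pvSplitKeepAux (cs : List Char) (acc : List Char) : List (List Char) :=
  match cs with
  | [] => if acc.isEmpty then [] else [acc.reverse]
  | c :: rest =>
    if c = '\n' then (acc.reverse ++ ['\n']) :: pvSplitKeepAux rest []
    else if c = '\r' then
      if rest.head? = some '\n' then (acc.reverse ++ ['\r', '\n']) :: pvSplitKeepAux rest.tail []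
      else (acc.reverse ++ ['\r']) :: pvSplitKeepAux rest []
    else pvSplitKeepAux rest (c :: acc)
termination_by cs.length
decreasing_by all_goals simp [List.length_tail]

def pvSplitKeep (text : String) : List (List Char) := pvSplitKeepAux text.toList []

-- line.rstrip("\n"): drop all trailing '\n' characters (exact).
def pvRstripNl (line : List Char) : List Char := (line.reverse.dropWhile (· = '\n')).reverse

def pvIncTok : List Char := ['#', 'i', 'n', 'c', 'l', 'u', 'd', 'e']
def pvSlashes : List Char := ['/', '/']

-- ===== PORT A =====
-- A's for-loop with break, over the remaining lines, carrying i, include_lines, rest_start.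
def pvLoopA (lines : List (List Char)) (i : Nat) (inc : List (List Char)) (rs : Nat) :
    List (List Char) × Nat :=
  match lines with
  | [] => (inc, rs)
  | line :: rest =>
    let stripped := PySem.Chars.strip line
    if PySem.Chars.startswith stripped pvIncTok then
      pvLoopA rest (i + 1) (inc ++ [pvRstripNl line]) (i + 1)
    else if stripped.isEmpty || PySem.Chars.startswith stripped pvSlashes then
      pvLoopA rest (i + 1) inc (if inc.isEmpty then i + 1 else rs)
    else (inc, rs)

def extract_includes_and_body (text : String) : List String × String :=
  let lines := pvSplitKeep text
  let r := pvLoopA lines 0 [] 0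
  (r.1.map String.ofList, String.ofList (PySem.Chars.join [] (lines.drop r.2)))

-- ===== PORT B =====
-- B's kind(line): 2 = include, 1 = blank/comment, 0 = ordinary line.
def pvKind (line : List Char) : Nat :=
  let s := PySem.Chars.strip line
  if PySem.Chars.startswith s pvIncTok then 2
  else if s.isEmpty || PySem.Chars.startswith s pvSlashes then 1
  else 0

def extract_includes_and_body_alt (text : String) : List String × String :=
  let lines := pvSplitKeep text
  let kinds := lines.map pvKind
  -- p = kinds.index(0) if 0 in kinds else len(kinds)
  let p := if kinds.contains 0 then (PySem.List.index? kinds 0).getD 0 else kinds.length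
  let pref := kinds.take p
  -- [line.rstrip("\n") for line, k in zip(lines, prefix) if k == 2]
  let includes := ((lines.zip pref).filter (fun lk => lk.2 == 2)).map (fun lk => pvRstripNl lk.1)
  -- body_start = p - list(reversed(prefix)).index(2) if 2 in prefix else p
  let bodyStart := if pref.contains 2 then p - (PySem.List.index? pref.reverse 2).getD 0 else p
  (includes.map String.ofList, String.ofList (PySem.Chars.join [] (lines.drop bodyStart)))

-- ===== PRECONDITION & SPEC =====
def Spec_extract_includes_and_body (text : String) (out : List String × String) : Prop := out = extract_includes_and_body_alt text
instance (text : String) (out : List String × String) : Decidable (Spec_extract_includes_and_body text out) := by unfold Spec_extract_includes_and_body; infer_instance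

-- ===== CLAIM (what is proved, stated in full; the proofs are below) =====
def Claim_equal_extract_includes_and_body : Prop := ∀ (text : String), Dom_extract_includes_and_body text → Spec_extract_includes_and_body text (extract_includes_and_body text)

-- ===== LEMMAS AND PROOFS =====

-- Proof-only reference recursion: (includes, body_start) of a line list, stated structurally.
def pvSc (lines : List (List Char)) : List (List Char) × Nat :=
  match lines with
  | [] => ([], 0)
  | l :: rest =>
    let k := pvKind l
    if k = 0 then ([], 0)
    else
      let r := pvSc rest
      if k = 2 then (pvRstripNl l :: r.1, if r.1.isEmpty then 1 else 1 + r.2)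
      else (r.1, 1 + r.2)

theorem pvSc_cons_inc (l : List Char) (rest : List (List Char))
    (h1 : PySem.Chars.startswith (PySem.Chars.strip l) pvIncTok = true) :
    pvSc (l :: rest) = (pvRstripNl l :: (pvSc rest).1,
      if (pvSc rest).1.isEmpty then 1 else 1 + (pvSc rest).2) := by
  simp [pvSc, pvKind, h1]

theorem pvSc_cons_blank (l : List Char) (rest : List (List Char))
    (h1 : ¬ PySem.Chars.startswith (PySem.Chars.strip l) pvIncTok = true)
    (hb : ((PySem.Chars.strip l).isEmpty || PySem.Chars.startswith (PySem.Chars.strip l) pvSlashes) = true) :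
    pvSc (l :: rest) = ((pvSc rest).1, 1 + (pvSc rest).2) := by
  simp [pvSc, pvKind, h1, hb]

theorem pvSc_cons_other (l : List Char) (rest : List (List Char))
    (h1 : ¬ PySem.Chars.startswith (PySem.Chars.strip l) pvIncTok = true)
    (hb : ¬ ((PySem.Chars.strip l).isEmpty || PySem.Chars.startswith (PySem.Chars.strip l) pvSlashes) = true) :
    pvSc (l :: rest) = ([], 0) := by
  simp [pvSc, pvKind, h1, hb]

theorem pvLoopA_ne (lines : List (List Char)) (i : Nat) (inc : List (List Char)) (rs : Nat)
    (h : inc.isEmpty = false) :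
    pvLoopA lines i inc rs =
      (inc ++ (pvSc lines).1, if (pvSc lines).1.isEmpty then rs else i + (pvSc lines).2) := by
  induction lines generalizing i inc rs with
  | nil => simp [pvLoopA, pvSc]
  | cons l rest ih =>
    by_cases h1 : PySem.Chars.startswith (PySem.Chars.strip l) pvIncTok = true
    · rw [pvSc_cons_inc _ _ h1]
      simp only [pvLoopA, h1, if_true]
      rw [ih _ _ _ (by simp)]
      by_cases he : (pvSc rest).1.isEmpty <;> simp [he, Nat.add_assoc]
    · by_cases hb : ((PySem.Chars.strip l).isEmpty || PySem.Chars.startswith (PySem.Chars.strip l) pvSlashes) = true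
      · rw [pvSc_cons_blank _ _ h1 hb]
        simp only [pvLoopA, h1, hb, if_true, if_false, Bool.false_eq_true, h]
        rw [ih _ _ _ h]
        by_cases he : (pvSc rest).1.isEmpty <;> simp [he, Nat.add_assoc]
      · rw [pvSc_cons_other _ _ h1 hb]
        simp only [pvLoopA, h1, hb]
        simp

theorem pvLoopA_empty (lines : List (List Char)) (i : Nat) :
    pvLoopA lines i [] i = ((pvSc lines).1, i + (pvSc lines).2) := by
  induction lines generalizing i with
  | nil => simp [pvLoopA, pvSc]
  | cons l rest ih =>
    by_cases h1 : PySem.Chars.startswith (PySem.Chars.strip l) pvIncTok = true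
    · rw [pvSc_cons_inc _ _ h1]
      simp only [pvLoopA, h1, if_true, List.nil_append]
      rw [pvLoopA_ne _ _ _ _ (by simp)]
      by_cases he : (pvSc rest).1.isEmpty <;> simp [he, Nat.add_assoc]
    · by_cases hb : ((PySem.Chars.strip l).isEmpty || PySem.Chars.startswith (PySem.Chars.strip l) pvSlashes) = true
      · rw [pvSc_cons_blank _ _ h1 hb]
        simp only [pvLoopA, h1, hb, if_true, if_false, Bool.false_eq_true, List.isEmpty_nil]
        rw [ih]
        simp [Nat.add_assoc]
      · rw [pvSc_cons_other _ _ h1 hb]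
        simp only [pvLoopA, h1, hb]
        simp

-- index? returns an in-range position.
theorem pvIndex?_lt {xs : List Nat} {v : Nat} {k : Nat}
    (h : PySem.List.index? xs v = some k) : k < xs.length := by
  rcases PySem.List.getElem_of_index?_eq_some h with ⟨hk, _, _⟩
  exact hk

-- Proof-only names for the components of B's pipeline.
def pvP (lines : List (List Char)) : Nat :=
  if (lines.map pvKind).contains 0 then (PySem.List.index? (lines.map pvKind) 0).getD 0
  else (lines.map pvKind).length

def pvPref (lines : List (List Char)) : List Nat := (lines.map pvKind).take (pvP lines)

def pvIncB (lines : List (List Char)) : List (List Char) :=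
  ((lines.zip (pvPref lines)).filter (fun lk => lk.2 == 2)).map (fun lk => pvRstripNl lk.1)

def pvBS (lines : List (List Char)) : Nat :=
  if (pvPref lines).contains 2 then pvP lines - (PySem.List.index? (pvPref lines).reverse 2).getD 0
  else pvP lines

theorem pvAltChar (text : String) :
    extract_includes_and_body_alt text =
      ((pvIncB (pvSplitKeep text)).map String.ofList,
       String.ofList (PySem.Chars.join [] ((pvSplitKeep text).drop (pvBS (pvSplitKeep text))))) := rfl

theorem pvP_cons_zero (l : List Char) (rest : List (List Char)) (hk : pvKind l = 0) :
    pvP (l :: rest) = 0 := by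
  simp only [pvP, List.map_cons, hk]
  rw [PySem.List.index?_cons_self]
  simp

theorem pvP_cons_ne (l : List Char) (rest : List (List Char)) (hk : pvKind l ≠ 0) :
    pvP (l :: rest) = pvP rest + 1 := by
  have hms : (0 ∈ pvKind l :: rest.map pvKind) ↔ 0 ∈ rest.map pvKind := by
    simp [Ne.symm hk]
  by_cases hc : 0 ∈ rest.map pvKind
  · obtain ⟨j, hj⟩ := Option.isSome_iff_exists.mp ((PySem.List.index?_isSome_iff _ _).mpr hc)
    simp only [pvP, List.map_cons]
    rw [PySem.List.index?_cons_of_ne _ hk, hj]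
    simp [hc, hms]
  · simp [pvP, hc, hms]

theorem pvP_le (lines : List (List Char)) : pvP lines ≤ lines.length := by
  by_cases hc : 0 ∈ lines.map pvKind
  · obtain ⟨j, hj⟩ := Option.isSome_iff_exists.mp ((PySem.List.index?_isSome_iff _ _).mpr hc)
    have hlt := pvIndex?_lt hj
    have hcc : (lines.map pvKind).contains 0 = true := by simpa using hc
    simp only [pvP, hcc, if_true]
    rw [hj]
    simpa using hlt.le
  · simp [pvP, hc]

theorem pvPref_cons_ne (l : List Char) (rest : List (List Char)) (hk : pvKind l ≠ 0) :
    pvPref (l :: rest) = pvKind l :: pvPref rest := by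
  simp [pvPref, pvP_cons_ne l rest hk, List.take_succ_cons]

theorem pvPref_length (lines : List (List Char)) : (pvPref lines).length = pvP lines := by
  simp only [pvPref, List.length_take, List.length_map]
  exact Nat.min_eq_left (pvP_le lines)

theorem pvBchar (lines : List (List Char)) :
    pvIncB lines = (pvSc lines).1 ∧ pvBS lines = (pvSc lines).2
    ∧ ((pvPref lines).contains 2 = !(pvSc lines).1.isEmpty)
    ∧ ((pvSc lines).1.isEmpty = true → (pvSc lines).2 = pvP lines) := by
  induction lines with
  | nil => refine ⟨rfl, rfl, rfl, fun _ => rfl⟩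
  | cons l rest ih =>
    obtain ⟨ih1, ih2, ih3, ih4⟩ := ih
    by_cases h1 : PySem.Chars.startswith (PySem.Chars.strip l) pvIncTok = true
    · -- include line, kind 2
      have hk : pvKind l = 2 := by simp [pvKind, h1]
      have hkne : pvKind l ≠ 0 := by simp [hk]
      have hp := pvP_cons_ne l rest hkne
      have hpref := pvPref_cons_ne l rest hkne
      have hsc := pvSc_cons_inc l rest h1
      have hinc : pvIncB (l :: rest) = pvRstripNl l :: pvIncB rest := by
        simp [pvIncB, hpref, hk, List.zip_cons_cons]
      have hcont : (pvPref (l :: rest)).contains 2 = true := by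
        simp [hpref, hk]
      refine ⟨by rw [hinc, ih1, hsc], ?_, by rw [hcont, hsc]; simp, by rw [hsc]; simp⟩
      rw [pvBS, hcont, if_pos rfl, hp, hpref, hk, hsc]
      rw [show ((2 : Nat) :: pvPref rest).reverse = (pvPref rest).reverse ++ [2] from by simp]
      by_cases he : (pvSc rest).1.isEmpty = true
      · have hc0 : (pvPref rest).contains 2 = false := by rw [ih3, he]; rfl
        have hnc : (2 : Nat) ∉ (pvPref rest).reverse := by
          simp only [List.mem_reverse]
          simpa using hc0
        rw [PySem.List.index?_append_singleton_self _ 2 hnc]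
        simp [he, pvPref_length]
      · have hc2 : (2 : Nat) ∈ (pvPref rest).reverse := by
          have hct : (pvPref rest).contains 2 = true := by rw [ih3]; simp [he]
          simp only [List.mem_reverse]
          simpa using hct
        obtain ⟨j, hj⟩ := Option.isSome_iff_exists.mp ((PySem.List.index?_isSome_iff _ _).mpr hc2)
        have hjlt : j < pvP rest := by
          have := pvIndex?_lt hj
          simpa [pvPref_length] using this
        rw [PySem.List.index?_append_of_mem _ hc2, hj]
        simp only [Option.getD_some]
        have hbs : pvBS rest = pvP rest - j := by
          rw [pvBS]
          have hct : (pvPref rest).contains 2 = true := by rw [ih3]; simp [he]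
          rw [hct, if_pos rfl, hj]
          simp
        rw [← ih2, hbs] at *
        simp only [he, Bool.false_eq_true, if_false]
        omega
    · by_cases hb : ((PySem.Chars.strip l).isEmpty || PySem.Chars.startswith (PySem.Chars.strip l) pvSlashes) = true
      · -- blank/comment line, kind 1
        have hk : pvKind l = 1 := by simp [pvKind, h1, hb]
        have hkne : pvKind l ≠ 0 := by simp [hk]
        have hp := pvP_cons_ne l rest hkne
        have hpref := pvPref_cons_ne l rest hkne
        have hsc := pvSc_cons_blank l rest h1 hb
        have hinc : pvIncB (l :: rest) = pvIncB rest := by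
          simp [pvIncB, hpref, hk, List.zip_cons_cons]
        have hcont : (pvPref (l :: rest)).contains 2 = (pvPref rest).contains 2 := by
          simp [hpref, hk]
        refine ⟨by rw [hinc, ih1, hsc], ?_, by rw [hcont, ih3, hsc], ?_⟩
        · rw [pvBS, hcont, hp, hpref, hk, hsc]
          by_cases he : (pvSc rest).1.isEmpty = true
          · have hc0 : (pvPref rest).contains 2 = false := by rw [ih3, he]; rfl
            rw [hc0]
            simp only [Bool.false_eq_true, if_false]
            rw [ih4 he]
            omega
          · have hct : (pvPref rest).contains 2 = true := by rw [ih3]; simp [he]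
            rw [hct, if_pos rfl]
            have hc2 : (2 : Nat) ∈ (pvPref rest).reverse := by
              simp only [List.mem_reverse]
              simpa using hct
            obtain ⟨j, hj⟩ := Option.isSome_iff_exists.mp ((PySem.List.index?_isSome_iff _ _).mpr hc2)
            have hjlt : j < pvP rest := by
              have := pvIndex?_lt hj
              simpa [pvPref_length] using this
            rw [show ((1 : Nat) :: pvPref rest).reverse = (pvPref rest).reverse ++ [1] from by simp]
            rw [PySem.List.index?_append_of_mem _ hc2, hj]
            simp only [Option.getD_some]
            have hbs : pvBS rest = pvP rest - j := by
              rw [pvBS, hct, if_pos rfl, hj]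
              simp
            rw [← ih2, hbs] at *
            omega
        · rw [hsc]
          intro he
          simp only at he ⊢
          have hre : (pvSc rest).1.isEmpty = true := by simpa using he
          rw [ih4 hre, hp]
          omega
      · -- ordinary line, kind 0
        have hk : pvKind l = 0 := by simp [pvKind, h1, hb]
        have hp := pvP_cons_zero l rest hk
        have hpref : pvPref (l :: rest) = [] := by simp [pvPref, hp]
        have hsc := pvSc_cons_other l rest h1 hb
        refine ⟨?_, ?_, ?_, ?_⟩ <;> simp [pvIncB, pvBS, hpref, hp, hsc]

-- ===== VERDICT (by name: the statement is the Claim_ definition above) =====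
theorem extract_includes_and_body_spec : Claim_equal_extract_includes_and_body := by
  intro text _
  unfold Spec_extract_includes_and_body extract_includes_and_body
  simp only []
  rw [pvLoopA_empty (pvSplitKeep text) 0, pvAltChar]
  rcases pvBchar (pvSplitKeep text) with ⟨h1, h2, _, _⟩
  rw [h1, h2]
  simp
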